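-- pv_equiv track=rewrite | github.com/gs-ai/ACE-T | cyto_gui.py | get_n_hop_nodes
-- ===== SOURCE A (Python) =====
-- from typing import Any, Dict, List, Set, Tuple, cast
--
-- def get_n_hop_nodes(focus_id: str, edges: List[dict], depth: int) -> set[str]:
--     if not focus_id or depth <= 0:
--         return {focus_id} if focus_id else set()
--
--     adjacency: Dict[str, set] = {}
--     for e in edges:
--         d = e.get("data") or {}
--         s = str(d.get("source") or "")
--         t = str(d.get("target") or "")
--         if not s or not t:
--             continue
--         adjacency.setdefault(s, set()).add(t)
--         adjacency.setdefault(t, set()).add(s)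
--
--     visited = {focus_id}
--     frontier = {focus_id}
--     for _ in range(depth):
--         next_frontier = set()
--         for nid in frontier:
--             for neigh in adjacency.get(nid, set()):
--                 if neigh not in visited:
--                     visited.add(neigh)
--                     next_frontier.add(neigh)
--         frontier = next_frontier
--
--     return visited
-- ===== SOURCE B (Python) =====
-- from typing import List
--
--
-- def get_n_hop_nodes(focus_id: str, edges: List[dict], depth: int) -> set:
--     if not focus_id or depth <= 0:
--         return {focus_id} if focus_id else set()
--
--     # Normalize once to a flat list of (source, target) pairs; no adjacency index.
--     pairs = []
--     for e in edges:
--         d = e.get("data") or {}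
--         s = str(d.get("source") or "")
--         t = str(d.get("target") or "")
--         if s != "" and t != "":
--             pairs.append((s, t))
--
--     visited = {focus_id}
--     frontier = [focus_id]
--     k = depth
--     while k > 0 and frontier:
--         level = []
--         for u in frontier:
--             for s, t in pairs:
--                 if s == u and t not in visited:
--                     visited.add(t)
--                     level.append(t)
--                 if t == u and s not in visited:
--                     visited.add(s)
--                     level.append(s)
--         frontier = level
--         k -= 1
--     return visited
-- ===== Notes on version B (the rewrite author's own statement) =====
-- stated objective: alternative
-- what changed: Removes the adjacency hash map entirely: B normalizes the edges once into a flat (source, target) pair list and, for each frontier node, finds its neighbours by rescanning that flat list (brute-force scan instead of a dict index), with an early exit once the frontier empties instead of always running depth rounds.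
import Mathlib
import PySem

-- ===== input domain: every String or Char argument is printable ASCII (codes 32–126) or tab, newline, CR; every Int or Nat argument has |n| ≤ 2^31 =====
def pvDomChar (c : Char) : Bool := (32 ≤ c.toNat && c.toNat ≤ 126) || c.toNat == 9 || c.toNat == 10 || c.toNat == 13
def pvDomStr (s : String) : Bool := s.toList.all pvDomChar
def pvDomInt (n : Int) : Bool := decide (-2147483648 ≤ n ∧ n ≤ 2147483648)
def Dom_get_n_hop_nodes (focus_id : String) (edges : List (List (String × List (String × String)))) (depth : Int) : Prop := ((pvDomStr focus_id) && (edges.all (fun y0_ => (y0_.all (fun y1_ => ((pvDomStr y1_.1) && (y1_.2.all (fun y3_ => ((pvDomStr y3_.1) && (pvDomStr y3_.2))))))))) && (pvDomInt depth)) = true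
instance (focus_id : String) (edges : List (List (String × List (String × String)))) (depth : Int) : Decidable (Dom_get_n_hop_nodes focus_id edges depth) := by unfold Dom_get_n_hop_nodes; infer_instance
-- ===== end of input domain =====

-- B drops A's adjacency hash map: it normalizes the edges once into a flat (source, target)
-- pair list and finds each frontier node's neighbours by rescanning that list, exiting early
-- when the frontier empties (objective: alternative; not faster).

-- ===== PORT A =====
-- A, transliterated: guard, adjacency-dict-building loop, then `depth` rounds of the
-- frontier-set loop over a (visited, frontier) pair.
def get_n_hop_nodes (focus_id : String) (edges : List (List (String × List (String × String)))) (depth : Int) : List String :=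
  if focus_id = "" ∨ depth ≤ 0 then
    (if focus_id = "" then PySem.Set.empty else PySem.Set.ofList [focus_id])
  else
    let adjacency : PySem.Dict String (PySem.Set String) :=
      edges.foldl (fun adjacency e =>
        let d := (PySem.Dict.mk e).getD "data" []
        let s := (PySem.Dict.mk d).getD "source" ""
        let t := (PySem.Dict.mk d).getD "target" ""
        if s = "" ∨ t = "" then adjacency
        else
          let adjacency := adjacency.insert s (PySem.Set.add (adjacency.getD s PySem.Set.empty) t)
          adjacency.insert t (PySem.Set.add (adjacency.getD t PySem.Set.empty) s))
        PySem.Dict.empty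
    ((PySem.List.pyRange 0 depth 1).foldl (fun st _ =>
        st.2.foldl (fun (acc : PySem.Set String × PySem.Set String) nid =>
            (adjacency.getD nid PySem.Set.empty).foldl (fun acc neigh =>
              if acc.1.contains neigh then acc
              else (PySem.Set.add acc.1 neigh, PySem.Set.add acc.2 neigh)) acc)
          (st.1, PySem.Set.empty))
      (PySem.Set.ofList [focus_id], PySem.Set.ofList [focus_id])).1

-- ===== PORT B =====
-- Source B's normalization loop: the flat list of cleaned (source, target) pairs.
def pvCleanPairs (edges : List (List (String × List (String × String)))) : List (String × String) :=
  edges.foldl (fun pairs e =>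
    let d := (PySem.Dict.mk e).getD "data" []
    let s := (PySem.Dict.mk d).getD "source" ""
    let t := (PySem.Dict.mk d).getD "target" ""
    if s ≠ "" ∧ t ≠ "" then pairs ++ [(s, t)] else pairs) []

-- Source B's `while k > 0 and frontier:` loop; recursion on the decremented k (the loop also
-- stops when the frontier is empty, exactly as in Source B).
def pvGrow (pairs : List (String × String)) (visited : PySem.Set String) (frontier : List String) (k : Int) : PySem.Set String :=
  if k ≤ 0 ∨ frontier = [] then visited
  else
    let st := frontier.foldl (fun (acc : PySem.Set String × List String) u =>
        pairs.foldl (fun (acc2 : PySem.Set String × List String) p =>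
          let acc2 := if p.1 = u ∧ ¬ PySem.Set.contains acc2.1 p.2
                      then (PySem.Set.add acc2.1 p.2, acc2.2 ++ [p.2]) else acc2
          if p.2 = u ∧ ¬ PySem.Set.contains acc2.1 p.1
          then (PySem.Set.add acc2.1 p.1, acc2.2 ++ [p.1]) else acc2) acc)
      (visited, ([] : List String))
    pvGrow pairs st.1 st.2 (k - 1)
termination_by k.toNat
decreasing_by
  rename_i h
  simp only [not_or] at h
  have := h.1
  omega

def get_n_hop_nodes_alt (focus_id : String) (edges : List (List (String × List (String × String)))) (depth : Int) : List String :=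
  if focus_id = "" ∨ depth ≤ 0 then
    (if focus_id = "" then PySem.Set.empty else PySem.Set.ofList [focus_id])
  else
    let pairs := pvCleanPairs edges
    pvGrow pairs (PySem.Set.ofList [focus_id]) [focus_id] depth

-- ===== PRECONDITION & SPEC =====
def Spec_get_n_hop_nodes (focus_id : String) (edges : List (List (String × List (String × String)))) (depth : Int) (out : List String) : Prop := out = get_n_hop_nodes_alt focus_id edges depth
instance (focus_id : String) (edges : List (List (String × List (String × String)))) (depth : Int) (out : List String) : Decidable (Spec_get_n_hop_nodes focus_id edges depth out) := by unfold Spec_get_n_hop_nodes; infer_instance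

-- ===== CLAIM (what is proved, stated in full; the proofs are below) =====
def Claim_equal_get_n_hop_nodes : Prop := ∀ (focus_id : String) (edges : List (List (String × List (String × String)))) (depth : Int), Dom_get_n_hop_nodes focus_id edges depth → Spec_get_n_hop_nodes focus_id edges depth (get_n_hop_nodes focus_id edges depth)

-- ===== LEMMAS AND PROOFS =====

-- the fresh (not-in-v) first occurrences of a list, in order
def pvNew (v : List String) : List String → List String
  | [] => []
  | x :: xs => if x ∈ v then pvNew v xs else x :: pvNew (v ++ [x]) xs

-- A's per-neighbour step (visited set, next-frontier set)
def pvStepA : PySem.Set String × PySem.Set String → String → PySem.Set String × PySem.Set String :=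
  fun acc neigh => if acc.1.contains neigh then acc
    else (PySem.Set.add acc.1 neigh, PySem.Set.add acc.2 neigh)

-- B's per-candidate step (visited set, level list)
def pvStepL : PySem.Set String × List String → String → PySem.Set String × List String :=
  fun acc x => if PySem.Set.contains acc.1 x then acc
    else (PySem.Set.add acc.1 x, acc.2 ++ [x])

theorem pvStepA_mem {v nf : List String} {x : String} (hx : x ∈ v) : pvStepA (v, nf) x = (v, nf) := by
  simp [pvStepA, hx]

theorem pvStepA_not {v nf : List String} {x : String} (hx : x ∉ v) (hnf : x ∉ nf) :
    pvStepA (v, nf) x = (v ++ [x], nf ++ [x]) := by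
  simp [pvStepA, PySem.Set.add, hx, hnf]

theorem pvStepL_mem {v : List String} {lv : List String} {x : String} (hx : x ∈ v) :
    pvStepL (v, lv) x = (v, lv) := by
  simp [pvStepL, hx]

theorem pvStepL_not {v : List String} {lv : List String} {x : String} (hx : x ∉ v) :
    pvStepL (v, lv) x = (v ++ [x], lv ++ [x]) := by
  simp [pvStepL, PySem.Set.add, hx]

theorem pvInnerA (ns : List String) :
    ∀ (v nf : List String), (∀ x ∈ nf, x ∈ v) →
    ns.foldl pvStepA (v, nf) = (v ++ pvNew v ns, nf ++ pvNew v ns) := by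
  induction ns with
  | nil => intro v nf h; simp [pvNew]
  | cons x xs ih =>
    intro v nf h
    rw [List.foldl_cons]
    by_cases hx : x ∈ v
    · rw [pvStepA_mem hx, ih v nf h]; simp [pvNew, hx]
    · have hnf : x ∉ nf := fun hm => hx (h x hm)
      rw [pvStepA_not hx hnf, ih (v ++ [x]) (nf ++ [x]) (by
        intro y hy; rcases List.mem_append.1 hy with h1 | h1
        · exact List.mem_append.2 (Or.inl (h y h1))
        · exact List.mem_append.2 (Or.inr h1))]
      simp [pvNew, hx]

theorem pvInnerL (ns : List String) :
    ∀ (v lv : List String),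
    ns.foldl pvStepL (v, lv) = (v ++ pvNew v ns, lv ++ pvNew v ns) := by
  induction ns with
  | nil => intro v lv; simp [pvNew]
  | cons x xs ih =>
    intro v lv
    rw [List.foldl_cons]
    by_cases hx : x ∈ v
    · rw [pvStepL_mem hx, ih v lv]; simp [pvNew, hx]
    · rw [pvStepL_not hx, ih (v ++ [x]) (lv ++ [x])]; simp [pvNew, hx]

theorem pvNew_append (l1 : List String) :
    ∀ (l2 v : List String), pvNew v (l1 ++ l2) = pvNew v l1 ++ pvNew (v ++ pvNew v l1) l2 := by
  induction l1 with
  | nil => intro l2 v; simp [pvNew]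
  | cons x xs ih =>
    intro l2 v
    by_cases hx : x ∈ v
    · simp only [List.cons_append, pvNew, hx, if_true]
      exact ih l2 v
    · simp only [List.cons_append, pvNew, hx, if_false]
      rw [ih l2 (v ++ [x])]
      simp [List.append_assoc]

theorem mem_pvNew {x : String} : ∀ (l v : List String), x ∈ l → x ∉ v → x ∈ pvNew v l := by
  intro l
  induction l with
  | nil => intro v h; simp at h
  | cons y ys ih =>
    intro v hl hv
    by_cases hxy : x = y
    · subst hxy
      simp [pvNew, hv]
    · have hys : x ∈ ys := by
        rcases List.mem_cons.1 hl with h1 | h1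
        · exact absurd h1 hxy
        · exact h1
      by_cases hy : y ∈ v
      · simp only [pvNew, hy, if_true]
        exact ih v hys hv
      · simp only [pvNew, hy, if_false]
        exact List.mem_cons_of_mem _ (ih (v ++ [y]) hys (by simp [hv, hxy]))

-- duplicates already in the accumulating set do not change what pvNew sees
theorem pvNew_foldl_add (raw : List String) :
    ∀ (acc v : List String), pvNew v (raw.foldl PySem.Set.add acc) = pvNew v (acc ++ raw) := by
  induction raw with
  | nil => intro acc v; simp
  | cons x xs ih =>
    intro acc v
    rw [List.foldl_cons]
    by_cases hx : x ∈ acc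
    · have hadd : PySem.Set.add acc x = acc := by simp [PySem.Set.add, hx]
      rw [hadd, ih acc v]
      rw [pvNew_append acc xs, pvNew_append acc (x :: xs)]
      have hxin : x ∈ v ++ pvNew v acc := by
        by_cases hv : x ∈ v
        · exact List.mem_append.2 (Or.inl hv)
        · exact List.mem_append.2 (Or.inr (mem_pvNew acc v hx hv))
      simp [pvNew, hxin]
    · have hadd : PySem.Set.add acc x = acc ++ [x] := by simp [PySem.Set.add, hx]
      rw [hadd, ih (acc ++ [x]) v]
      simp

-- the raw neighbour-occurrence list of u in the cleaned pair list, in scan order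
def pvRaw (u : String) : List (String × String) → List String
  | [] => []
  | (s, t) :: ps => ((if s = u then [t] else []) ++ (if t = u then [s] else [])) ++ pvRaw u ps

theorem pvRaw_append (u : String) (l1 : List (String × String)) :
    ∀ l2, pvRaw u (l1 ++ l2) = pvRaw u l1 ++ pvRaw u l2 := by
  induction l1 with
  | nil => intro l2; simp [pvRaw]
  | cons p ps ih =>
    intro l2
    cases p
    simp [pvRaw, ih, List.append_assoc]

-- the recursive form of Source B's normalization loop
def pvCleanR : List (List (String × List (String × String))) → List (String × String)
  | [] => []
  | e :: es =>
    let d := (PySem.Dict.mk e).getD "data" []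
    let s := (PySem.Dict.mk d).getD "source" ""
    let t := (PySem.Dict.mk d).getD "target" ""
    (if s ≠ "" ∧ t ≠ "" then [(s, t)] else []) ++ pvCleanR es

theorem pvCleanPairs_foldl (edges : List (List (String × List (String × String)))) :
    ∀ acc, edges.foldl (fun pairs e =>
      let d := (PySem.Dict.mk e).getD "data" []
      let s := (PySem.Dict.mk d).getD "source" ""
      let t := (PySem.Dict.mk d).getD "target" ""
      if s ≠ "" ∧ t ≠ "" then pairs ++ [(s, t)] else pairs) acc = acc ++ pvCleanR edges := by
  induction edges with
  | nil => intro acc; simp [pvCleanR]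
  | cons e es ih =>
    intro acc
    rw [List.foldl_cons]
    simp only [pvCleanR]
    split_ifs with h
    · rw [ih]; simp
    · rw [ih]; simp

theorem pvCleanPairs_eq (edges : List (List (String × List (String × String)))) :
    pvCleanPairs edges = pvCleanR edges := by
  simpa using pvCleanPairs_foldl edges []

-- A's dict step per edge
def pvAStep (adjacency : PySem.Dict String (PySem.Set String)) (e : List (String × List (String × String))) : PySem.Dict String (PySem.Set String) :=
  let d := (PySem.Dict.mk e).getD "data" []
  let s := (PySem.Dict.mk d).getD "source" ""
  let t := (PySem.Dict.mk d).getD "target" ""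
  if s = "" ∨ t = "" then adjacency
  else
    let adjacency := adjacency.insert s (PySem.Set.add (adjacency.getD s PySem.Set.empty) t)
    adjacency.insert t (PySem.Set.add (adjacency.getD t PySem.Set.empty) s)

-- one non-skipped edge's effect on the adjacency value at u
theorem pvAdjStep (D : PySem.Dict String (PySem.Set String)) (s t u : String) :
    ((D.insert s (PySem.Set.add (D.getD s PySem.Set.empty) t)).insert t
        (PySem.Set.add ((D.insert s (PySem.Set.add (D.getD s PySem.Set.empty) t)).getD t PySem.Set.empty) s)).getD u PySem.Set.empty
      = ((if s = u then [t] else []) ++ (if t = u then [s] else [])).foldl PySem.Set.add (D.getD u PySem.Set.empty) := by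
  simp only [PySem.Dict.getD_insert]
  by_cases hsu : s = u <;> by_cases htu : t = u <;>
    simp_all [List.foldl, eq_comm]

-- the adjacency value at u is exactly the deduplicated raw neighbour list
theorem pvAdj_raw (edges : List (List (String × List (String × String)))) :
    ∀ (D : PySem.Dict String (PySem.Set String)) (u : String),
    (edges.foldl pvAStep D).getD u PySem.Set.empty
      = (pvRaw u (pvCleanR edges)).foldl PySem.Set.add (D.getD u PySem.Set.empty) := by
  induction edges with
  | nil => intro D u; simp [pvCleanR, pvRaw]
  | cons e es ih =>
    intro D u
    rw [List.foldl_cons]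
    show (es.foldl pvAStep (pvAStep D e)).getD u PySem.Set.empty = _
    rw [ih (pvAStep D e) u]
    simp only [pvCleanR]
    by_cases hskip : (PySem.Dict.mk ((PySem.Dict.mk e).getD "data" [])).getD "source" "" = "" ∨
        (PySem.Dict.mk ((PySem.Dict.mk e).getD "data" [])).getD "target" "" = ""
    · have hA : pvAStep D e = D := by simp only [pvAStep]; rw [if_pos hskip]
      have hC : ¬ ((PySem.Dict.mk ((PySem.Dict.mk e).getD "data" [])).getD "source" "" ≠ "" ∧
          (PySem.Dict.mk ((PySem.Dict.mk e).getD "data" [])).getD "target" "" ≠ "") := by tauto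
      rw [hA, if_neg hC]
      simp
    · have hC : ((PySem.Dict.mk ((PySem.Dict.mk e).getD "data" [])).getD "source" "" ≠ "" ∧
          (PySem.Dict.mk ((PySem.Dict.mk e).getD "data" [])).getD "target" "" ≠ "") := by tauto
      rw [if_pos hC]
      set s := (PySem.Dict.mk ((PySem.Dict.mk e).getD "data" [])).getD "source" "" with hs
      set t := (PySem.Dict.mk ((PySem.Dict.mk e).getD "data" [])).getD "target" "" with ht
      have hA : pvAStep D e =
          (D.insert s (PySem.Set.add (D.getD s PySem.Set.empty) t)).insert t
            (PySem.Set.add ((D.insert s (PySem.Set.add (D.getD s PySem.Set.empty) t)).getD t PySem.Set.empty) s) := by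
        simp only [pvAStep]
        rw [if_neg hskip]
      rw [hA, pvRaw_append, List.foldl_append]
      congr 1
      simpa [pvRaw] using pvAdjStep D s t u

-- what pvNew sees of the adjacency value is what it sees of the raw scan list
theorem pvNew_adj_raw (edges : List (List (String × List (String × String)))) (u : String) (v : List String) :
    pvNew v ((edges.foldl pvAStep PySem.Dict.empty).getD u PySem.Set.empty)
      = pvNew v (pvRaw u (pvCleanR edges)) := by
  rw [pvAdj_raw edges PySem.Dict.empty u]
  rw [PySem.Dict.getD_empty]
  have := pvNew_foldl_add (pvRaw u (pvCleanR edges)) PySem.Set.empty v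
  simpa [PySem.Set.empty] using this

-- level-by-level fresh nodes, A's form (via the adjacency dict)
def pvFresh (adj : PySem.Dict String (PySem.Set String)) (v : List String) : List String → List String
  | [] => []
  | f :: F => pvNew v (adj.getD f PySem.Set.empty) ++
      pvFresh adj (v ++ pvNew v (adj.getD f PySem.Set.empty)) F

def pvIter (adj : PySem.Dict String (PySem.Set String)) : Nat → List String × List String → List String × List String
  | 0, st => st
  | n + 1, st => pvIter adj n (st.1 ++ pvFresh adj st.1 st.2, pvFresh adj st.1 st.2)

theorem pvRoundA (adj : PySem.Dict String (PySem.Set String)) (F : List String) :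
    ∀ (v nf : List String), (∀ x ∈ nf, x ∈ v) →
    F.foldl (fun (acc : PySem.Set String × PySem.Set String) nid =>
        (adj.getD nid PySem.Set.empty).foldl pvStepA acc) (v, nf)
      = (v ++ pvFresh adj v F, nf ++ pvFresh adj v F) := by
  induction F with
  | nil => intro v nf h; simp [pvFresh]
  | cons f F ih =>
    intro v nf h
    rw [List.foldl_cons]
    have hin := pvInnerA (adj.getD f PySem.Set.empty) v nf h
    rw [hin]
    have h' : ∀ x ∈ nf ++ pvNew v (adj.getD f PySem.Set.empty),
        x ∈ v ++ pvNew v (adj.getD f PySem.Set.empty) := by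
      intro x hx
      rcases List.mem_append.1 hx with h1 | h1
      · exact List.mem_append.2 (Or.inl (h x h1))
      · exact List.mem_append.2 (Or.inr h1)
    rw [ih _ _ h']
    simp [pvFresh, List.append_assoc]

theorem pvRounds_foldl (adj : PySem.Dict String (PySem.Set String)) :
    ∀ (l : List Int) (v F : List String),
    l.foldl (fun (st : PySem.Set String × PySem.Set String) _ =>
        st.2.foldl (fun (acc : PySem.Set String × PySem.Set String) nid =>
            (adj.getD nid PySem.Set.empty).foldl pvStepA acc)
          (st.1, PySem.Set.empty)) (v, F)
      = pvIter adj l.length (v, F) := by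
  intro l
  induction l with
  | nil => intro v F; simp [pvIter]
  | cons a l ih =>
    intro v F
    rw [List.foldl_cons]
    have hr := pvRoundA adj F v [] (by intro x hx; simp at hx)
    simp only [List.nil_append] at hr
    simp only [PySem.Set.empty] at hr ⊢
    have ih' := ih (v ++ pvFresh adj v F) (pvFresh adj v F)
    simp only [PySem.Set.empty] at ih'
    rw [hr, ih']
    simp [pvIter]

theorem pvPyRange_length (b : Int) : (PySem.List.pyRange 0 b 1).length = b.toNat := by
  suffices h : ∀ (n : Nat) (a b : Int), (b - a).toNat = n → (PySem.List.pyRange a b 1).length = n by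
    exact h b.toNat 0 b (by omega)
  intro n
  induction n with
  | zero =>
    intro a b hab
    have : ¬ a < b := by omega
    simp [PySem.List.pyRange, this]
  | succ n ih =>
    intro a b hab
    have hlt : a < b := by omega
    rw [PySem.List.pyRange_one_cons hlt]
    simp only [List.length_cons]
    rw [ih (a + 1) b (by omega)]

-- B's inner pair scan for node u is the fold of pvStepL over the raw neighbour list
theorem pvScan_raw (u : String) (pairs : List (String × String)) :
    ∀ (acc : PySem.Set String × List String),
    pairs.foldl (fun (acc2 : PySem.Set String × List String) p =>
        let acc2 := if p.1 = u ∧ ¬ PySem.Set.contains acc2.1 p.2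
                    then (PySem.Set.add acc2.1 p.2, acc2.2 ++ [p.2]) else acc2
        if p.2 = u ∧ ¬ PySem.Set.contains acc2.1 p.1
        then (PySem.Set.add acc2.1 p.1, acc2.2 ++ [p.1]) else acc2) acc
      = (pvRaw u pairs).foldl pvStepL acc := by
  induction pairs with
  | nil => intro acc; simp [pvRaw]
  | cons p ps ih =>
    intro acc
    obtain ⟨s, t⟩ := p
    rw [List.foldl_cons]
    simp only [pvRaw, List.append_assoc, List.foldl_append]
    rw [← ih]
    congr 1
    -- per-pair step = stepL over (optS ++ optT)
    show (let acc2 := if s = u ∧ ¬ PySem.Set.contains acc.1 t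
              then (PySem.Set.add acc.1 t, acc.2 ++ [t]) else acc
          if t = u ∧ ¬ PySem.Set.contains acc2.1 s
          then (PySem.Set.add acc2.1 s, acc2.2 ++ [s]) else acc2)
        = ((if t = u then [s] else []).foldl pvStepL ((if s = u then [t] else []).foldl pvStepL acc))
    by_cases hs : s = u <;> by_cases ht : t = u <;>
      simp [hs, ht, pvStepL]

-- B's round over the frontier equals A's pvFresh round
theorem pvRoundL (edges : List (List (String × List (String × String)))) (F : List String) :
    ∀ (v lv : List String),
    F.foldl (fun (acc : PySem.Set String × List String) u =>
        (pvCleanR edges).foldl (fun (acc2 : PySem.Set String × List String) p =>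
          let acc2 := if p.1 = u ∧ ¬ PySem.Set.contains acc2.1 p.2
                      then (PySem.Set.add acc2.1 p.2, acc2.2 ++ [p.2]) else acc2
          if p.2 = u ∧ ¬ PySem.Set.contains acc2.1 p.1
          then (PySem.Set.add acc2.1 p.1, acc2.2 ++ [p.1]) else acc2) acc) (v, lv)
      = (v ++ pvFresh (edges.foldl pvAStep PySem.Dict.empty) v F,
         lv ++ pvFresh (edges.foldl pvAStep PySem.Dict.empty) v F) := by
  induction F with
  | nil => intro v lv; simp [pvFresh]
  | cons f F ih =>
    intro v lv
    rw [List.foldl_cons]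
    rw [pvScan_raw f (pvCleanR edges) (v, lv)]
    rw [pvInnerL]
    rw [← pvNew_adj_raw edges f v]
    rw [ih]
    simp [pvFresh, List.append_assoc]

-- pvIter is the identity on an empty frontier
theorem pvIter_empty (adj : PySem.Dict String (PySem.Set String)) :
    ∀ (n : Nat) (v : List String), (pvIter adj n (v, [])).1 = v := by
  intro n
  induction n with
  | zero => intro v; simp [pvIter]
  | succ n ih => intro v; simp [pvIter, pvFresh, ih]

-- B's while loop computes A's level iteration
theorem pvGrow_iter (edges : List (List (String × List (String × String)))) :
    ∀ (n : Nat) (k : Int), k.toNat = n → ∀ (v F : List String),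
    pvGrow (pvCleanR edges) v F k
      = (pvIter (edges.foldl pvAStep PySem.Dict.empty) n (v, F)).1 := by
  intro n
  induction n with
  | zero =>
    intro k hk v F
    have hk0 : k ≤ 0 := by omega
    rw [pvGrow, if_pos (Or.inl hk0)]
    simp [pvIter]
  | succ n ih =>
    intro k hk v F
    have hkpos : ¬ k ≤ 0 := by omega
    by_cases hF : F = []
    · subst hF
      rw [pvGrow, if_pos (Or.inr rfl)]
      rw [pvIter_empty]
    · rw [pvGrow, if_neg (by tauto)]
      show pvGrow (pvCleanR edges) _ _ (k - 1) = _
      rw [pvRoundL edges F v []]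
      simp only [List.nil_append]
      rw [ih (k - 1) (by omega)]
      simp [pvIter]

-- ===== VERDICT (by name: the statement is the Claim_ definition above) =====
theorem get_n_hop_nodes_spec : Claim_equal_get_n_hop_nodes := by
  intro focus_id edges depth _
  unfold Spec_get_n_hop_nodes
  by_cases hg : focus_id = "" ∨ depth ≤ 0
  · unfold get_n_hop_nodes get_n_hop_nodes_alt
    rw [if_pos hg, if_pos hg]
  · have hA : get_n_hop_nodes focus_id edges depth
        = (pvIter (edges.foldl pvAStep PySem.Dict.empty) depth.toNat
            (([focus_id] : List String), ([focus_id] : List String))).1 := by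
      unfold get_n_hop_nodes
      rw [if_neg hg]
      show ((PySem.List.pyRange 0 depth 1).foldl (fun (st : PySem.Set String × PySem.Set String) _ =>
          st.2.foldl (fun (acc : PySem.Set String × PySem.Set String) nid =>
            ((edges.foldl pvAStep PySem.Dict.empty).getD nid PySem.Set.empty).foldl pvStepA acc)
            (st.1, PySem.Set.empty))
          (([focus_id] : List String), ([focus_id] : List String))).1 = _
      rw [pvRounds_foldl (edges.foldl pvAStep PySem.Dict.empty), pvPyRange_length]
    have hB : get_n_hop_nodes_alt focus_id edges depth
        = pvGrow (pvCleanR edges) ([focus_id] : List String) [focus_id] depth := by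
      unfold get_n_hop_nodes_alt
      rw [if_neg hg, pvCleanPairs_eq]
      rfl
    rw [hA, hB, pvGrow_iter edges depth.toNat depth rfl]
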